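-- pv_equiv track=rewrite | github.com/francool57/FProg-Resolucoes | LAB06-07/ex10.py | codifica
-- ===== SOURCE A (Python) =====
-- def codifica(chars):
--     left = ''
--     right = ''
--
--     for i,j in enumerate(chars):
--         if i % 2 == 1:
--             right += j
--         else:
--             left += j
--
--     return left+right
-- ===== SOURCE B (Python) =====
-- def codifica(chars):
--     return ''.join(chars[::2]) + ''.join(chars[1::2])
-- ===== Notes on version B (the rewrite author's own statement) =====
-- stated objective: faster
-- what changed: Replaces the indexed loop with its parity branch and two quadratically growing string accumulators by a closed-form partition: two strided slices chars[::2] and chars[1::2], joined and concatenated.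
import Mathlib
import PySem

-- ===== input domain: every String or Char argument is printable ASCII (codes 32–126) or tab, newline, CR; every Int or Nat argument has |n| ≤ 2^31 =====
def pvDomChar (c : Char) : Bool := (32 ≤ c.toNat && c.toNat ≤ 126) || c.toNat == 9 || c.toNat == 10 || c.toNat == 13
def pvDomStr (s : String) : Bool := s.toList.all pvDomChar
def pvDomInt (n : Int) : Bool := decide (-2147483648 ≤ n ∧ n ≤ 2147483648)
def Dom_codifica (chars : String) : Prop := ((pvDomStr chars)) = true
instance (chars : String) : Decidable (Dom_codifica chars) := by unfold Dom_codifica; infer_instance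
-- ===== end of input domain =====

-- B replaces A's branched indexed loop and growing string accumulators by a parity partition via two strided slices; measured faster in a timing run.


-- ===== PORT A =====
-- literal port of A: one pass over enumerate(chars), appending to 'left' or 'right' by index parity
def codifica (chars : String) : String :=
  let p := (PySem.List.enumerate chars.toList 0).foldl
    (fun (acc : List Char × List Char) ij =>
      if PySem.Int.mod ij.1 2 == 1 then (acc.1, acc.2 ++ [ij.2]) else (acc.1 ++ [ij.2], acc.2))
    ([], [])
  String.ofList (p.1 ++ p.2)

-- ===== PORT B =====
-- literal port of B: chars[::2] + chars[1::2]; slicing is on the char list (exact), step 2 is never 0 so getD [] is never hit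
def codifica_alt (chars : String) : String :=
  let l := chars.toList
  String.ofList (((PySem.List.slice? l none none 2).getD []) ++ ((PySem.List.slice? l (some 1) none 2).getD []))

-- ===== PRECONDITION & SPEC =====
def Spec_codifica (chars : String) (out : String) : Prop := out = codifica_alt chars
instance (chars : String) (out : String) : Decidable (Spec_codifica chars out) := by unfold Spec_codifica; infer_instance

-- ===== CLAIM (what is proved, stated in full; the proofs are below) =====
def Claim_equal_codifica : Prop := ∀ (chars : String), Dom_codifica chars → Spec_codifica chars (codifica chars)

-- ===== LEMMAS AND PROOFS =====

-- elements at even positions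
def pvEvens {α : Type} : List α → List α
  | [] => []
  | [a] => [a]
  | a :: _ :: t => a :: pvEvens t

-- elements at odd positions
def pvOdds {α : Type} : List α → List α
  | [] => []
  | [_] => []
  | _ :: b :: t => b :: pvOdds t

lemma pv_fm_even {α : Type} (xs : List α) :
    List.filterMap (fun k => xs[2 * k]?) (List.range ((xs.length + 1) / 2)) = pvEvens xs := by
  induction xs using pvEvens.induct with
  | case1 => simp [pvEvens]
  | case2 a => simp [pvEvens]
  | case3 a b t ih =>
    have hc : (((a :: b :: t).length + 1) / 2) = (t.length + 1) / 2 + 1 := by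
      simp; omega
    rw [hc, List.range_succ_eq_map, List.filterMap_cons, List.filterMap_map]
    have hfun : ((fun k => (a :: b :: t)[2 * k]?) ∘ Nat.succ) = (fun k => t[2 * k]?) := by
      funext k
      have h2 : 2 * k.succ = 2 * k + 1 + 1 := by omega
      simp [Function.comp, h2]
    rw [hfun, ih]
    simp [pvEvens]

lemma pv_fm_odd {α : Type} (xs : List α) :
    List.filterMap (fun k => xs[2 * k + 1]?) (List.range (xs.length / 2)) = pvOdds xs := by
  induction xs using pvOdds.induct with
  | case1 => simp [pvOdds]
  | case2 a => simp [pvOdds]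
  | case3 a b t ih =>
    have hc : ((a :: b :: t).length / 2) = t.length / 2 + 1 := by
      simp; omega
    rw [hc, List.range_succ_eq_map, List.filterMap_cons, List.filterMap_map]
    have hfun : ((fun k => (a :: b :: t)[2 * k + 1]?) ∘ Nat.succ) = (fun k => t[2 * k + 1]?) := by
      funext k
      have h2 : 2 * k.succ + 1 = 2 * k + 1 + 1 + 1 := by omega
      simp [Function.comp, h2]
    rw [hfun, ih]
    simp [pvOdds]

lemma pv_slice_even {α : Type} (xs : List α) :
    PySem.List.slice? xs none none 2 = some (pvEvens xs) := by
  rw [← pv_fm_even xs]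
  simp only [PySem.List.slice?, PySem.List.sliceIndices]
  norm_num
  have hcount : (((xs.length : Int) + 2 - 1) / 2).toNat = (xs.length + 1) / 2 := by omega
  by_cases h : 0 < xs.length
  · simp only [h, if_true, hcount]
    congr 1
  · have h0 : xs.length = 0 := by omega
    simp [h0]

lemma pv_slice_odd {α : Type} (xs : List α) :
    PySem.List.slice? xs (some 1) none 2 = some (pvOdds xs) := by
  rw [← pv_fm_odd xs]
  simp only [PySem.List.slice?, PySem.List.sliceIndices]
  norm_num
  by_cases h : 1 < xs.length
  · have h' : (1 : Int) < (xs.length : Int) := by exact_mod_cast h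
    have hmin : min (1 : Int) (xs.length : Int) = 1 := by omega
    have hcount : (((xs.length : Int) - 1 + 2 - 1) / 2).toNat = xs.length / 2 := by omega
    simp only [hmin, h, if_true, hcount]
    congr 1
    funext k
    have h2 : ((1 : Int) + 2 * (k : Int)).toNat = 2 * k + 1 := by omega
    rw [h2]
  · match xs, h with
    | [], _ => simp
    | [a], _ => simp
    | a :: b :: t, h => simp only [List.length_cons] at h; omega

lemma pv_fold_parity {α : Type} (xs : List α) :
    ∀ (s : Nat) (l r : List α), s % 2 = 0 →
      (PySem.List.enumerate xs (s : Int)).foldl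
        (fun (acc : List α × List α) ij =>
          if PySem.Int.mod ij.1 2 == 1 then (acc.1, acc.2 ++ [ij.2]) else (acc.1 ++ [ij.2], acc.2))
        (l, r) = (l ++ pvEvens xs, r ++ pvOdds xs) := by
  induction xs using pvEvens.induct with
  | case1 => intro s l r hs; simp [PySem.List.enumerate, pvEvens, pvOdds]
  | case2 a =>
    intro s l r hs
    have hm : PySem.Int.mod (s : Int) 2 = ((s % 2 : Nat) : Int) := PySem.Int.mod_natCast s 2
    have hc0 : (PySem.Int.mod (s : Int) 2 == 1) = false := by rw [hm, hs]; decide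
    simp only [PySem.List.enumerate, List.foldl_cons, List.foldl_nil, hc0, Bool.false_eq_true,
      if_false]
    simp [pvEvens, pvOdds]
  | case3 a b t ih =>
    intro s l r hs
    have hm : PySem.Int.mod (s : Int) 2 = ((s % 2 : Nat) : Int) := PySem.Int.mod_natCast s 2
    have hm1 : PySem.Int.mod ((s : Int) + 1) 2 = (((s + 1) % 2 : Nat) : Int) := by
      have := PySem.Int.mod_natCast (s + 1) 2
      simp only [Nat.cast_add, Nat.cast_one] at this
      exact this
    have hs1 : (s + 1) % 2 = 1 := by omega
    have hc0 : (PySem.Int.mod (s : Int) 2 == 1) = false := by rw [hm, hs]; decide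
    have hc1 : (PySem.Int.mod ((s : Int) + 1) 2 == 1) = true := by rw [hm1, hs1]; decide
    have hcast : ((s : Int) + 1 + 1) = (((s + 2 : Nat)) : Int) := by push_cast; ring
    simp only [PySem.List.enumerate, List.foldl_cons, hc0, hc1, if_true, if_false,
      Bool.false_eq_true]
    rw [hcast, ih (s + 2) (l ++ [a]) (r ++ [b]) (by omega)]
    simp [pvEvens, pvOdds]

-- ===== VERDICT (by name: the statement is the Claim_ definition above) =====
theorem codifica_spec : Claim_equal_codifica := by
  intro chars _
  have h := pv_fold_parity chars.toList 0 [] [] rfl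
  simp only [Nat.cast_zero, List.nil_append] at h
  simp only [Spec_codifica, codifica, codifica_alt, pv_slice_even, pv_slice_odd,
    Option.getD_some]
  rw [h]
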